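-- pv_equiv track=rewrite | github.com/taofineberg/netbox-helper | netbox_site_sync.py | _filter_site_data
-- ===== SOURCE A (Python) =====
-- from typing import Any, Callable, Dict, List, Optional, Set, Tuple
--
-- SITE_GROUP_ORDER = [
--     'sites',
--     'locations',
--     'racks',
--     'power-panels',
--     'devices',
--     'power-feeds',
--     'modules',
--     'cables',
--     'power-cables',
--     'vrf',
--     'prefixroles',
--     'prefix',
--     'ip-addresses',
-- ]
--
-- GROUP_DEPENDENCIES = {
--     'sites': [],
--     'locations': ['sites'],
--     'racks': ['sites', 'locations'],
--     'power-panels': ['sites'],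
--     'devices': ['sites', 'locations', 'racks'],
--     'power-feeds': ['sites', 'racks', 'power-panels'],
--     'modules': ['devices'],
--     'cables': ['devices', 'modules'],
--     'power-cables': ['devices', 'modules', 'power-feeds'],
--     'vrf': [],
--     'prefixroles': [],
--     'prefix': ['sites', 'vrf', 'prefixroles'],
--     'ip-addresses': ['devices', 'prefix'],
-- }
--
-- def _expand_dependencies(groups: List[str]) -> Tuple[List[str], List[str]]:
--     expanded = set(groups)
--     dependency_only = set()
--
--     changed = True
--     while changed:
--         changed = False
--         for group in list(expanded):
--             for dep in GROUP_DEPENDENCIES.get(group, []):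
--                 if dep not in expanded:
--                     expanded.add(dep)
--                     dependency_only.add(dep)
--                     changed = True
--
--     ordered_expanded = [g for g in SITE_GROUP_ORDER if g in expanded]
--     ordered_dep_only = [g for g in SITE_GROUP_ORDER if g in dependency_only and g not in groups]
--     return ordered_expanded, ordered_dep_only
--
-- def _filter_site_data(
--     full_data: Dict[str, List[Dict[str, str]]],
--     explicit_groups: List[str],
--     selected_items: Dict[str, Set[int]],
-- ) -> Tuple[Dict[str, List[Dict[str, str]]], List[str], List[str]]:
--     if not explicit_groups and not selected_items:
--         explicit_groups = list(SITE_GROUP_ORDER)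
--
--     group_from_items = [g for g in SITE_GROUP_ORDER if g in selected_items]
--     merged_explicit = []
--     seen = set()
--     for g in [*explicit_groups, *group_from_items]:
--         if g in SITE_GROUP_ORDER and g not in seen:
--             merged_explicit.append(g)
--             seen.add(g)
--
--     expanded_groups, dependency_only = _expand_dependencies(merged_explicit)
--
--     filtered: Dict[str, List[Dict[str, str]]] = {}
--     for group in expanded_groups:
--         rows = list(full_data.get(group) or [])
--         if group in selected_items and group not in dependency_only:
--             idxs = selected_items[group]
--             subset = [rows[i] for i in sorted(idxs) if 0 <= i < len(rows)]
--         else: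
--             subset = rows
--         if subset:
--             filtered[group] = subset
--
--     sections = [g for g in SITE_GROUP_ORDER if g in filtered]
--     return filtered, sections, dependency_only
-- ===== SOURCE B (Python) =====
-- from typing import Any, Callable, Dict, List, Optional, Set, Tuple
--
-- SITE_GROUP_ORDER = [
--     'sites',
--     'locations',
--     'racks',
--     'power-panels',
--     'devices',
--     'power-feeds',
--     'modules',
--     'cables',
--     'power-cables',
--     'vrf',
--     'prefixroles',
--     'prefix',
--     'ip-addresses',
-- ]
--
-- GROUP_DEPENDENCIES = {
--     'sites': [],
--     'locations': ['sites'],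
--     'racks': ['sites', 'locations'],
--     'power-panels': ['sites'],
--     'devices': ['sites', 'locations', 'racks'],
--     'power-feeds': ['sites', 'racks', 'power-panels'],
--     'modules': ['devices'],
--     'cables': ['devices', 'modules'],
--     'power-cables': ['devices', 'modules', 'power-feeds'],
--     'vrf': [],
--     'prefixroles': [],
--     'prefix': ['sites', 'vrf', 'prefixroles'],
--     'ip-addresses': ['devices', 'prefix'],
-- }
--
--
-- def _filter_site_data(
--     full_data: Dict[str, List[Dict[str, str]]],
--     explicit_groups: List[str],
--     selected_items: Dict[str, Set[int]],
-- ) -> Tuple[Dict[str, List[Dict[str, str]]], List[str], List[str]]: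
--     if not explicit_groups and not selected_items:
--         explicit_groups = list(SITE_GROUP_ORDER)
--
--     merged = {g for g in [*explicit_groups, *selected_items]
--               if g in GROUP_DEPENDENCIES}
--
--     # Dependencies always point to strictly earlier groups in SITE_GROUP_ORDER,
--     # so one reverse sweep computes the full transitive closure.
--     needed = set(merged)
--     for g in reversed(SITE_GROUP_ORDER):
--         if g in needed:
--             needed.update(GROUP_DEPENDENCIES[g])
--
--     dependency_only = [g for g in SITE_GROUP_ORDER
--                        if g in needed and g not in merged]
--
--     filtered: Dict[str, List[Dict[str, str]]] = {}
--     sections: List[str] = []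
--     for group in SITE_GROUP_ORDER:
--         if group not in needed:
--             continue
--         rows = full_data.get(group) or []
--         if group in merged and group in selected_items:
--             subset = [rows[i] for i in sorted(selected_items[group])
--                       if 0 <= i < len(rows)]
--         else:
--             subset = list(rows)
--         if subset:
--             filtered[group] = subset
--             sections.append(group)
--     return filtered, sections, dependency_only
-- ===== Notes on version B (the rewrite author's own statement) =====
-- stated objective: simpler
-- what changed: Replaces A's `while changed` fixed-point iteration for dependency expansion with a single reverse sweep over SITE_GROUP_ORDER (dependencies always point to strictly earlier groups, so one backward relaxation pass computes the full transitive closure), builds the merged group set directly as a set instead of A's ordered dedup list, derives dependency_only as closure-minus-merged instead of tracking it inside the loop, and fuses the row-filter loop with the sections collection instead of A's separate re-scan of SITE_GROUP_ORDER.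
import Mathlib
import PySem

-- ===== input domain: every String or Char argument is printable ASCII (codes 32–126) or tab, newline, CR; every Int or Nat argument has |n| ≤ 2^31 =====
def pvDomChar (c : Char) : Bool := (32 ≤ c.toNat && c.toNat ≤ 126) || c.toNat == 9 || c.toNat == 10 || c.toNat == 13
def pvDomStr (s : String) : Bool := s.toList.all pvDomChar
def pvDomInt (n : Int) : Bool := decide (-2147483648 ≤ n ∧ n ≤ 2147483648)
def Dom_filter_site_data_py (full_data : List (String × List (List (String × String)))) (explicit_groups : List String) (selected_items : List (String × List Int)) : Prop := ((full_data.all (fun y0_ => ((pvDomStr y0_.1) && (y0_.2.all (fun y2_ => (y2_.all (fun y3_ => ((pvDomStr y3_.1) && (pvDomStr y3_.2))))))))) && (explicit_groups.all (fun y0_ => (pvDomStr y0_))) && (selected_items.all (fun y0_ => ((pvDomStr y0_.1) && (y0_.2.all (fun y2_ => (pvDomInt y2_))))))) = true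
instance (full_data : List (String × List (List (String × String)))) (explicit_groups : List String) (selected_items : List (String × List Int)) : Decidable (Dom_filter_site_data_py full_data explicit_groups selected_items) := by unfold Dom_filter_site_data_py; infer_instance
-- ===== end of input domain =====

-- B replaces A's `while changed` fixed-point dependency expansion by a single reverse sweep over
-- SITE_GROUP_ORDER (dependencies always point to strictly earlier groups), and fuses the row-filter
-- loop with the section collection; objective: simpler, same result for every input.

-- ===== PORT A =====
-- shared module constants of both Python files
def pvORDER : List String :=
  ["sites", "locations", "racks", "power-panels", "devices", "power-feeds", "modules",
   "cables", "power-cables", "vrf", "prefixroles", "prefix", "ip-addresses"]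

def pvDEPS : PySem.Dict String (List String) := PySem.Dict.mk
  [("sites", []), ("locations", ["sites"]), ("racks", ["sites", "locations"]),
   ("power-panels", ["sites"]), ("devices", ["sites", "locations", "racks"]),
   ("power-feeds", ["sites", "racks", "power-panels"]), ("modules", ["devices"]),
   ("cables", ["devices", "modules"]), ("power-cables", ["devices", "modules", "power-feeds"]),
   ("vrf", []), ("prefixroles", []), ("prefix", ["sites", "vrf", "prefixroles"]),
   ("ip-addresses", ["devices", "prefix"])]

-- GROUP_DEPENDENCIES.get(g, []) (also GROUP_DEPENDENCIES[g] for keys, same value there)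
def pvDepsOf (g : String) : List String := pvDEPS.getD g []

-- `rows = full_data.get(group) or []` (values are lists; empty list and missing key both give [])
def pvRows (full_data : List (String × List (List (String × String)))) (group : String) :
    List (List (String × String)) :=
  ((PySem.Dict.mk full_data).get? group).getD []

-- `[rows[i] for i in sorted(idxs) if 0 <= i < len(rows)]` with idxs = selected_items[group]
-- (identical lines in both Python versions, so shared by both ports)
def pvSelect (selected_items : List (String × List Int)) (rows : List (List (String × String)))
    (group : String) : List (List (String × String)) :=
  (PySem.List.sorted (((PySem.Dict.mk selected_items).get? group).getD []) (fun x => x) false).filterMap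
    (fun i => if 0 ≤ i ∧ i < (rows.length : Int) then PySem.List.pyGet? rows i else none)

-- inner `for dep in GROUP_DEPENDENCIES.get(group, [])` of A's while-loop body
def pvPassDeps : List String → PySem.Set String → PySem.Set String → Bool →
    PySem.Set String × PySem.Set String × Bool
  | [], e, d, c => (e, d, c)
  | dep :: ds, e, d, c =>
    if PySem.Set.contains e dep then pvPassDeps ds e d c
    else pvPassDeps ds (PySem.Set.add e dep) (PySem.Set.add d dep) true

-- `for group in list(expanded)` (snapshot of the set at the start of the pass)
def pvPassGroups : List String → PySem.Set String → PySem.Set String → Bool →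
    PySem.Set String × PySem.Set String × Bool
  | [], e, d, c => (e, d, c)
  | g :: gs, e, d, c =>
    let r := pvPassDeps (pvDepsOf g) e d c
    pvPassGroups gs r.1 r.2.1 r.2.2

-- `while changed:`; the fuel argument only makes the loop total: every productive pass adds a
-- fresh element of the 13-element pvORDER, so 14 is never exhausted (established in the proofs)
def pvExpandLoop : Nat → PySem.Set String → PySem.Set String →
    PySem.Set String × PySem.Set String
  | 0, e, d => (e, d)
  | fuel + 1, e, d =>
    let r := pvPassGroups e e d false
    if r.2.2 then pvExpandLoop fuel r.1 r.2.1 else (r.1, r.2.1)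

-- _expand_dependencies
def pvExpandDependencies (groups : List String) : List String × List String :=
  let r := pvExpandLoop 14 (PySem.Set.ofList groups) PySem.Set.empty
  (pvORDER.filter (fun g => PySem.Set.contains r.1 g),
   pvORDER.filter (fun g => PySem.Set.contains r.2 g && !(groups.contains g)))

-- body of A's `for group in expanded_groups` filtering loop
def pvSubsetA (full_data : List (String × List (List (String × String))))
    (selected_items : List (String × List Int)) (dep_only : List String) (group : String) :
    List (List (String × String)) :=
  let rows := pvRows full_data group
  if (PySem.Dict.mk selected_items).contains group && !(dep_only.contains group) then
    pvSelect selected_items rows group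
  else rows

def pvStepA (full_data : List (String × List (List (String × String))))
    (selected_items : List (String × List Int)) (dep_only : List String)
    (acc : PySem.Dict String (List (List (String × String)))) (group : String) :
    PySem.Dict String (List (List (String × String))) :=
  let subset := pvSubsetA full_data selected_items dep_only group
  if subset.isEmpty then acc else acc.insert group subset

def filter_site_data_py (full_data : List (String × List (List (String × String)))) (explicit_groups : List String) (selected_items : List (String × List Int)) : (List (String × List (List (String × String)))) × List String × List String :=
  let eg := if explicit_groups.isEmpty && selected_items.isEmpty then pvORDER else explicit_groups
  let group_from_items := pvORDER.filter (fun g => (PySem.Dict.mk selected_items).contains g)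
  let merged := ((eg ++ group_from_items).foldl
      (fun (st : List String × PySem.Set String) g =>
        if pvORDER.contains g && !(PySem.Set.contains st.2 g) then
          (st.1 ++ [g], PySem.Set.add st.2 g)
        else st) ([], PySem.Set.empty)).1
  let ed := pvExpandDependencies merged
  let filtered := ed.1.foldl (pvStepA full_data selected_items ed.2) PySem.Dict.empty
  let sections := pvORDER.filter (fun g => filtered.contains g)
  (filtered.items, sections, ed.2)

-- ===== PORT B =====
-- `if g in needed: needed.update(GROUP_DEPENDENCIES[g])`
def pvRelax (S : PySem.Set String) (g : String) : PySem.Set String :=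
  if PySem.Set.contains S g then PySem.Set.update S (pvDepsOf g) else S

-- body of B's fused filtering loop, after the `continue` guard
def pvSubsetB (full_data : List (String × List (List (String × String))))
    (selected_items : List (String × List Int)) (merged : PySem.Set String) (group : String) :
    List (List (String × String)) :=
  let rows := pvRows full_data group
  if PySem.Set.contains merged group && (PySem.Dict.mk selected_items).contains group then
    pvSelect selected_items rows group
  else rows

def pvStepB' (full_data : List (String × List (List (String × String))))
    (selected_items : List (String × List Int)) (merged : PySem.Set String)
    (st : PySem.Dict String (List (List (String × String))) × List String) (group : String) :
    PySem.Dict String (List (List (String × String))) × List String :=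
  let subset := pvSubsetB full_data selected_items merged group
  if subset.isEmpty then st else (st.1.insert group subset, st.2 ++ [group])

def pvStepB (full_data : List (String × List (List (String × String))))
    (selected_items : List (String × List Int)) (merged needed : PySem.Set String)
    (st : PySem.Dict String (List (List (String × String))) × List String) (group : String) :
    PySem.Dict String (List (List (String × String))) × List String :=
  if !(PySem.Set.contains needed group) then st
  else pvStepB' full_data selected_items merged st group

def filter_site_data_py_alt (full_data : List (String × List (List (String × String)))) (explicit_groups : List String) (selected_items : List (String × List Int)) : (List (String × List (List (String × String)))) × List String × List String :=
  let eg := if explicit_groups.isEmpty && selected_items.isEmpty then pvORDER else explicit_groups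
  let merged := PySem.Set.ofList
      ((eg ++ (PySem.Dict.mk selected_items).keys).filter (fun g => pvDEPS.contains g))
  let needed := pvORDER.reverse.foldl pvRelax merged
  let dependency_only := pvORDER.filter
      (fun g => PySem.Set.contains needed g && !(PySem.Set.contains merged g))
  let st := pvORDER.foldl (pvStepB full_data selected_items merged needed)
      (PySem.Dict.empty, [])
  (st.1.items, st.2, dependency_only)

-- ===== PRECONDITION & SPEC =====
def Spec_filter_site_data_py (full_data : List (String × List (List (String × String)))) (explicit_groups : List String) (selected_items : List (String × List Int)) (out : (List (String × List (List (String × String)))) × List String × List String) : Prop := out = filter_site_data_py_alt full_data explicit_groups selected_items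
instance (full_data : List (String × List (List (String × String)))) (explicit_groups : List String) (selected_items : List (String × List Int)) (out : (List (String × List (List (String × String)))) × List String × List String) : Decidable (Spec_filter_site_data_py full_data explicit_groups selected_items out) := by unfold Spec_filter_site_data_py; infer_instance

-- ===== CLAIM (what is proved, stated in full; the proofs are below) =====
def Claim_equal_filter_site_data_py : Prop := ∀ (full_data : List (String × List (List (String × String)))) (explicit_groups : List String) (selected_items : List (String × List Int)), Dom_filter_site_data_py full_data explicit_groups selected_items → Spec_filter_site_data_py full_data explicit_groups selected_items (filter_site_data_py full_data explicit_groups selected_items)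

-- ===== LEMMAS AND PROOFS =====

theorem pvDeps_sub_ORDER : ∀ g d, d ∈ pvDepsOf g → d ∈ pvORDER := by
  intro g d hd
  unfold pvDepsOf pvDEPS at hd
  simp only [PySem.Dict.getD, PySem.Dict.get?, List.find?_cons] at hd
  repeat' split at hd
  all_goals (simp_all [pvORDER]; try tauto)

theorem pvDEPS_contains_iff : ∀ x, pvDEPS.contains x = true ↔ x ∈ pvORDER := by
  intro x
  simp [pvDEPS, pvORDER, PySem.Dict.contains_mk]
  tauto

theorem pvPassDeps_spec : ∀ (ds : List String) (e d : PySem.Set String) (c : Bool),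
    (∀ x ∈ e, x ∈ (pvPassDeps ds e d c).1) ∧
    (∀ x ∈ (pvPassDeps ds e d c).1, x ∈ e ∨ x ∈ ds) ∧
    (∀ x, x ∈ (pvPassDeps ds e d c).2.1 ↔ x ∈ d ∨ (x ∈ (pvPassDeps ds e d c).1 ∧ x ∉ e)) ∧
    ((pvPassDeps ds e d c).2.2 = false →
      (pvPassDeps ds e d c).1 = e ∧ (pvPassDeps ds e d c).2.1 = d ∧ c = false ∧ ∀ x ∈ ds, x ∈ e) ∧
    ((pvPassDeps ds e d c).2.2 = c ∨ ∃ x, x ∈ (pvPassDeps ds e d c).1 ∧ x ∉ e) ∧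
    (e.Nodup → (pvPassDeps ds e d c).1.Nodup) := by
  intro ds
  induction ds with
  | nil =>
    intro e d c
    refine ⟨fun x hx => hx, fun x hx => Or.inl hx, fun x => by simp [pvPassDeps], ?_, Or.inl rfl, fun h => h⟩
    intro h
    exact ⟨rfl, rfl, h, by simp⟩
  | cons dep ds ih =>
    intro e d c
    by_cases hc : PySem.Set.contains e dep
    · have hmem : dep ∈ e := (PySem.Set.contains_iff e dep).mp hc
      have hred : pvPassDeps (dep :: ds) e d c = pvPassDeps ds e d c := by
        simp only [pvPassDeps]; rw [if_pos hc]
      rw [hred]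
      obtain ⟨h1, h2, h3, h4, h5, h6⟩ := ih e d c
      refine ⟨h1, fun x hx => ?_, h3, fun hf => ?_, h5, h6⟩
      · rcases h2 x hx with h | h
        · exact Or.inl h
        · exact Or.inr (List.mem_cons_of_mem _ h)
      · obtain ⟨he, hd, hcf, hds⟩ := h4 hf
        exact ⟨he, hd, hcf, fun x hx => by
          rcases List.mem_cons.mp hx with rfl | hx
          · exact hmem
          · exact hds x hx⟩
    · have hmem : dep ∉ e := fun h => hc ((PySem.Set.contains_iff e dep).mpr h)
      have hred : pvPassDeps (dep :: ds) e d c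
          = pvPassDeps ds (PySem.Set.add e dep) (PySem.Set.add d dep) true := by
        simp only [pvPassDeps]; rw [if_neg hc]
      rw [hred]
      obtain ⟨h1, h2, h3, h4, h5, h6⟩ := ih (PySem.Set.add e dep) (PySem.Set.add d dep) true
      have hsub : ∀ x ∈ e, x ∈ PySem.Set.add e dep := by
        intro x hx; exact (PySem.Set.mem_add e dep x).mpr (Or.inl hx)
      have hdepin : dep ∈ (pvPassDeps ds (PySem.Set.add e dep) (PySem.Set.add d dep) true).1 :=
        h1 dep ((PySem.Set.mem_add e dep dep).mpr (Or.inr rfl))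
      refine ⟨fun x hx => h1 x (hsub x hx), fun x hx => ?_, fun x => ?_, fun hf => ?_,
        Or.inr ⟨dep, hdepin, hmem⟩, fun hn => h6 (PySem.Set.nodup_add e dep hn)⟩
      · rcases h2 x hx with h | h
        · rcases (PySem.Set.mem_add e dep x).mp h with h' | h'
          · exact Or.inl h'
          · exact Or.inr (h' ▸ List.mem_cons_self ..)
        · exact Or.inr (List.mem_cons_of_mem _ h)
      · rw [h3 x]
        rw [PySem.Set.mem_add, PySem.Set.mem_add]
        constructor
        · rintro (⟨h | rfl⟩ | ⟨hx1, hx2⟩)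
          · exact Or.inl h
          · exact Or.inr ⟨hdepin, hmem⟩
          · exact Or.inr ⟨hx1, fun h => hx2 (Or.inl h)⟩
        · rintro (h | ⟨hx1, hx2⟩)
          · exact Or.inl (Or.inl h)
          · by_cases hxd : x = dep
            · exact Or.inl (Or.inr hxd)
            · exact Or.inr ⟨hx1, fun h => (by rcases h with h | h; exact hx2 h; exact hxd h : False)⟩
      · obtain ⟨_, _, hcf, _⟩ := h4 hf
        exact absurd hcf (by simp)

theorem pvPassGroups_spec : ∀ (gs : List String) (e d : PySem.Set String) (c : Bool),
    (∀ x ∈ e, x ∈ (pvPassGroups gs e d c).1) ∧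
    (∀ x ∈ (pvPassGroups gs e d c).1, x ∈ e ∨ ∃ g ∈ gs, x ∈ pvDepsOf g) ∧
    (∀ x, x ∈ (pvPassGroups gs e d c).2.1 ↔ x ∈ d ∨ (x ∈ (pvPassGroups gs e d c).1 ∧ x ∉ e)) ∧
    ((pvPassGroups gs e d c).2.2 = false →
      (pvPassGroups gs e d c).1 = e ∧ (pvPassGroups gs e d c).2.1 = d ∧ c = false ∧
        ∀ g ∈ gs, ∀ x ∈ pvDepsOf g, x ∈ e) ∧
    ((pvPassGroups gs e d c).2.2 = c ∨ ∃ x, x ∈ (pvPassGroups gs e d c).1 ∧ x ∉ e) ∧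
    (e.Nodup → (pvPassGroups gs e d c).1.Nodup) := by
  intro gs
  induction gs with
  | nil =>
    intro e d c
    refine ⟨fun x hx => hx, fun x hx => Or.inl hx, fun x => by simp [pvPassGroups],
      fun h => ⟨rfl, rfl, h, by simp⟩, Or.inl rfl, fun h => h⟩
  | cons g gs ih =>
    intro e d c
    have hred : pvPassGroups (g :: gs) e d c
        = pvPassGroups gs (pvPassDeps (pvDepsOf g) e d c).1
            (pvPassDeps (pvDepsOf g) e d c).2.1 (pvPassDeps (pvDepsOf g) e d c).2.2 := rfl
    rw [hred]
    obtain ⟨p1, p2, p3, p4, p5, p6⟩ := pvPassDeps_spec (pvDepsOf g) e d c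
    obtain ⟨q1, q2, q3, q4, q5, q6⟩ := ih (pvPassDeps (pvDepsOf g) e d c).1
      (pvPassDeps (pvDepsOf g) e d c).2.1 (pvPassDeps (pvDepsOf g) e d c).2.2
    set r := pvPassDeps (pvDepsOf g) e d c with hr
    set R := pvPassGroups gs r.1 r.2.1 r.2.2 with hR
    have hsub1 : ∀ x ∈ e, x ∈ r.1 := p1
    have hsub2 : ∀ x ∈ r.1, x ∈ R.1 := q1
    refine ⟨fun x hx => hsub2 x (hsub1 x hx), fun x hx => ?_, fun x => ?_, fun hf => ?_, ?_, ?_⟩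
    · rcases q2 x hx with h | ⟨g', hg', hx'⟩
      · rcases p2 x h with h' | h'
        · exact Or.inl h'
        · exact Or.inr ⟨g, List.mem_cons_self .., h'⟩
      · exact Or.inr ⟨g', List.mem_cons_of_mem _ hg', hx'⟩
    · rw [q3 x, p3 x]
      constructor
      · rintro ((h | ⟨h1, h2⟩) | ⟨h1, h2⟩)
        · exact Or.inl h
        · exact Or.inr ⟨hsub2 x h1, h2⟩
        · exact Or.inr ⟨h1, fun h => h2 (hsub1 x h)⟩
      · rintro (h | ⟨h1, h2⟩)
        · exact Or.inl (Or.inl h)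
        · by_cases hxr : x ∈ r.1
          · exact Or.inl (Or.inr ⟨hxr, h2⟩)
          · exact Or.inr ⟨h1, hxr⟩
    · obtain ⟨hR1, hR2, hrc, hgs⟩ := q4 hf
      obtain ⟨hr1, hr2, hcf, hds⟩ := p4 hrc
      rw [hR1, hr1, hR2, hr2]
      refine ⟨rfl, rfl, hcf, fun g' hg' x hx => ?_⟩
      rcases List.mem_cons.mp hg' with rfl | hg'
      · exact hds x hx
      · exact hr1 ▸ hgs g' hg' x hx
    · rcases q5 with h | ⟨x, hx1, hx2⟩
      · rw [h]
        rcases p5 with h' | ⟨x, hx1, hx2⟩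
        · exact Or.inl h'
        · exact Or.inr ⟨x, hsub2 x hx1, hx2⟩
      · refine Or.inr ⟨x, hx1, fun h => hx2 (hsub1 x h)⟩
    · exact fun hn => q6 (p6 hn)

inductive pvInCl (P : String → Prop) : String → Prop
  | base {g : String} : P g → pvInCl P g
  | step {h g : String} : pvInCl P h → g ∈ pvDepsOf h → pvInCl P g

theorem pvInCl_collapse {P Q : String → Prop} (h : ∀ g, Q g → pvInCl P g) :
    ∀ {x : String}, pvInCl Q x → pvInCl P x := by
  intro x hx
  induction hx with
  | base hb => exact h _ hb
  | step _ hd ih => exact pvInCl.step ih hd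

theorem pvInCl_congr {P Q : String → Prop} (h : ∀ g, Q g ↔ P g) {x : String} :
    pvInCl Q x ↔ pvInCl P x :=
  ⟨pvInCl_collapse (fun g hg => pvInCl.base ((h g).mp hg)),
   pvInCl_collapse (fun g hg => pvInCl.base ((h g).mpr hg))⟩

theorem pvMsr_lt (e e' : PySem.Set String) (hsub : ∀ x ∈ e, x ∈ e')
    (w : String) (hw1 : w ∈ e') (hw2 : w ∉ e) (hw3 : w ∈ pvORDER) :
    (pvORDER.filter (fun g => !(PySem.Set.contains e' g))).length
      < (pvORDER.filter (fun g => !(PySem.Set.contains e g))).length := by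
  have hsl : (pvORDER.filter (fun g => !(PySem.Set.contains e' g))).Sublist
      (pvORDER.filter (fun g => !(PySem.Set.contains e g))) := by
    apply List.monotone_filter_right
    intro a ha
    simp only [Bool.not_eq_eq_eq_not, Bool.not_true] at ha ⊢
    rcases Bool.eq_false_iff.mp ha with _
    by_cases h : PySem.Set.contains e a = true
    · exact absurd (hsub a ((PySem.Set.contains_iff e a).mp h))
        (fun hh => by rw [(PySem.Set.contains_iff e' a).mpr hh] at ha; simp at ha)
    · exact Bool.eq_false_iff.mpr h
  rcases Nat.lt_or_ge (pvORDER.filter (fun g => !(PySem.Set.contains e' g))).length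
      (pvORDER.filter (fun g => !(PySem.Set.contains e g))).length with h | h
  · exact h
  · exfalso
    have heq := hsl.eq_of_length (Nat.le_antisymm hsl.length_le h)
    have hwin : w ∈ pvORDER.filter (fun g => !(PySem.Set.contains e g)) := by
      refine List.mem_filter.mpr ⟨hw3, ?_⟩
      simp only [Bool.not_eq_eq_eq_not, Bool.not_true]
      exact Bool.eq_false_iff.mpr (fun hh => hw2 ((PySem.Set.contains_iff e w).mp hh))
    rw [← heq] at hwin
    have := (List.mem_filter.mp hwin).2
    rw [(PySem.Set.contains_iff e' w).mpr hw1] at this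
    simp at this

theorem pvExpandLoop_spec : ∀ (fuel : Nat) (e d : PySem.Set String), e.Nodup →
    (pvORDER.filter (fun g => !(PySem.Set.contains e g))).length < fuel →
    (∀ x ∈ e, x ∈ (pvExpandLoop fuel e d).1) ∧
    (∀ x ∈ (pvExpandLoop fuel e d).1, pvInCl (· ∈ e) x) ∧
    (∀ g ∈ (pvExpandLoop fuel e d).1, ∀ x ∈ pvDepsOf g, x ∈ (pvExpandLoop fuel e d).1) ∧
    (∀ x, x ∈ (pvExpandLoop fuel e d).2 ↔ x ∈ d ∨ (x ∈ (pvExpandLoop fuel e d).1 ∧ x ∉ e)) := by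
  intro fuel
  induction fuel with
  | zero => intro e d _ hlt; exact absurd hlt (by simp)
  | succ fuel ih =>
    intro e d hnd hlt
    obtain ⟨p1, p2, p3, p4, p5, p6⟩ := pvPassGroups_spec e e d false
    set r := pvPassGroups e e d false with hrdef
    have hInCl_r : ∀ x ∈ r.1, pvInCl (· ∈ e) x := by
      intro x hx
      rcases p2 x hx with h | ⟨g, hg, hd⟩
      · exact pvInCl.base h
      · exact pvInCl.step (pvInCl.base hg) hd
    by_cases hch : r.2.2 = true
    · have hred : pvExpandLoop (fuel + 1) e d = pvExpandLoop fuel r.1 r.2.1 := by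
        simp only [pvExpandLoop]; rw [hrdef] at hch ⊢; rw [if_pos hch]
      obtain ⟨w, hw1, hw2⟩ : ∃ x, x ∈ r.1 ∧ x ∉ e := by
        rcases p5 with h | h
        · rw [hch] at h; exact absurd h.symm (by simp)
        · exact h
      have hw3 : w ∈ pvORDER := by
        rcases p2 w hw1 with h | ⟨g, _, hd⟩
        · exact absurd h hw2
        · exact pvDeps_sub_ORDER g w hd
      have hlt' : (pvORDER.filter (fun g => !(PySem.Set.contains r.1 g))).length < fuel := by
        have := pvMsr_lt e r.1 p1 w hw1 hw2 hw3
        omega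
      obtain ⟨q1, q2, q3, q4⟩ := ih r.1 r.2.1 (p6 hnd) hlt'
      rw [hred]
      refine ⟨fun x hx => q1 x (p1 x hx), fun x hx => pvInCl_collapse hInCl_r (q2 x hx), q3,
        fun x => ?_⟩
      rw [q4 x, p3 x]
      constructor
      · rintro ((h | ⟨h1, h2⟩) | ⟨h1, h2⟩)
        · exact Or.inl h
        · exact Or.inr ⟨q1 x h1, h2⟩
        · exact Or.inr ⟨h1, fun h => h2 (p1 x h)⟩
      · rintro (h | ⟨h1, h2⟩)
        · exact Or.inl (Or.inl h)
        · by_cases hxr : x ∈ r.1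
          · exact Or.inl (Or.inr ⟨hxr, h2⟩)
          · exact Or.inr ⟨h1, hxr⟩
    · have hch' : r.2.2 = false := by simpa using hch
      obtain ⟨hr1, hr2, _, hcl⟩ := p4 hch'
      have hred : pvExpandLoop (fuel + 1) e d = (r.1, r.2.1) := by
        simp only [pvExpandLoop]; rw [hrdef] at hch' ⊢; rw [if_neg (by simp [hch'])]
      rw [hred, hr1, hr2]
      exact ⟨fun x hx => hx, fun x hx => pvInCl.base hx, hcl, fun x => by simp⟩

theorem pvA_closure (m : List String) :
    (∀ x, x ∈ (pvExpandLoop 14 (PySem.Set.ofList m) PySem.Set.empty).1 ↔ pvInCl (· ∈ m) x) ∧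
    (∀ x, x ∈ (pvExpandLoop 14 (PySem.Set.ofList m) PySem.Set.empty).2 ↔
      x ∈ (pvExpandLoop 14 (PySem.Set.ofList m) PySem.Set.empty).1 ∧ x ∉ m) := by
  have hlt : (pvORDER.filter (fun g => !(PySem.Set.contains (PySem.Set.ofList m) g))).length < 14 := by
    have := List.length_filter_le (fun g => !(PySem.Set.contains (PySem.Set.ofList m) g)) pvORDER
    have h13 : pvORDER.length = 13 := by decide
    omega
  obtain ⟨q1, q2, q3, q4⟩ := pvExpandLoop_spec 14 (PySem.Set.ofList m) PySem.Set.empty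
    (PySem.Set.nodup_ofList m) hlt
  have hofm : ∀ x : String, x ∈ PySem.Set.ofList m ↔ x ∈ m := fun x => PySem.Set.mem_ofList m x
  constructor
  · intro x
    constructor
    · intro hx
      exact (pvInCl_congr hofm).mp (q2 x hx)
    · intro hx
      induction hx with
      | base hb => exact q1 _ ((hofm _).mpr hb)
      | step _ hd ih => exact q3 _ ih _ hd
  · intro x
    rw [q4 x]
    have : x ∉ PySem.Set.empty := by simp [PySem.Set.empty]
    simp only [hofm]
    tauto

def pvGood : List String → Bool
  | [] => true
  | g :: t => (pvDepsOf g).all (fun d => t.contains d) && pvGood t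

theorem pvGood_ORDER : pvGood pvORDER.reverse = true := by decide

theorem pvRelaxFold_spec : ∀ (l : List String) (S : PySem.Set String), pvGood l = true →
    (∀ g ∈ S, g ∈ l ∨ ∀ x ∈ pvDepsOf g, x ∈ S) →
    (∀ x ∈ S, x ∈ l.foldl pvRelax S) ∧
    (∀ x ∈ l.foldl pvRelax S, pvInCl (· ∈ S) x) ∧
    (∀ g ∈ l.foldl pvRelax S, ∀ x ∈ pvDepsOf g, x ∈ l.foldl pvRelax S) := by
  intro l
  induction l with
  | nil =>
    intro S _ hS
    refine ⟨fun x hx => hx, fun x hx => pvInCl.base hx, fun g hg x hx => ?_⟩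
    rcases hS g hg with h | h
    · exact absurd h (List.not_mem_nil)
    · exact h x hx
  | cons g t ih =>
    intro S hgood hS
    have hgood' : pvGood t = true := by
      have : ((pvDepsOf g).all (fun d => t.contains d) && pvGood t) = true := hgood
      exact (Bool.and_eq_true _ _).mp this |>.2
    have hdeps_t : ∀ x ∈ pvDepsOf g, x ∈ t := by
      intro x hx
      have h1 := ((Bool.and_eq_true _ _).mp hgood).1
      have := List.all_eq_true.mp h1 x hx
      exact List.mem_of_elem_eq_true this
    have hstep : List.foldl pvRelax S (g :: t) = List.foldl pvRelax (pvRelax S g) t := rfl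
    rw [hstep]
    set S' := pvRelax S g with hS'
    have hsubS' : ∀ x ∈ S, x ∈ S' := by
      intro x hx
      rw [hS']; unfold pvRelax
      split_ifs with h
      · exact (PySem.Set.mem_update S (pvDepsOf g) x).mpr (Or.inl hx)
      · exact hx
    have hS'cases : ∀ x ∈ S', x ∈ S ∨ (g ∈ S ∧ x ∈ pvDepsOf g) := by
      intro x hx
      rw [hS'] at hx; unfold pvRelax at hx
      split_ifs at hx with h
      · rcases (PySem.Set.mem_update S (pvDepsOf g) x).mp hx with h' | h'
        · exact Or.inl h'
        · exact Or.inr ⟨(PySem.Set.contains_iff S g).mp h, h'⟩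
      · exact Or.inl hx
    have hinv : ∀ h ∈ S', h ∈ t ∨ ∀ x ∈ pvDepsOf h, x ∈ S' := by
      intro h hh
      rcases hS'cases h hh with hin | ⟨hgS, hdep⟩
      · rcases hS h hin with hl | hcl
        · rcases List.mem_cons.mp hl with rfl | hl'
          · -- h = g : if g ∈ S then its deps were just added
            by_cases hgS : PySem.Set.contains S h
            · refine Or.inr (fun x hx => ?_)
              rw [hS']; unfold pvRelax
              rw [if_pos hgS]
              exact (PySem.Set.mem_update S (pvDepsOf h) x).mpr (Or.inr hx)
            · exact absurd ((PySem.Set.contains_iff S h).mpr hin) hgS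
          · exact Or.inl hl'
        · exact Or.inr (fun x hx => hsubS' x (hcl x hx))
      · exact Or.inl (hdeps_t h hdep)
    obtain ⟨q1, q2, q3⟩ := ih S' hgood' hinv
    refine ⟨fun x hx => q1 x (hsubS' x hx), fun x hx => ?_, q3⟩
    refine pvInCl_collapse (fun y hy => ?_) (q2 x hx)
    rcases hS'cases y hy with h | ⟨hgS, hdep⟩
    · exact pvInCl.base h
    · exact pvInCl.step (pvInCl.base hgS) hdep

theorem pvB_closure (m : PySem.Set String) (hm : ∀ g ∈ m, g ∈ pvORDER) :
    ∀ x, x ∈ pvORDER.reverse.foldl pvRelax m ↔ pvInCl (· ∈ m) x := by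
  obtain ⟨q1, q2, q3⟩ := pvRelaxFold_spec pvORDER.reverse m pvGood_ORDER
    (fun g hg => Or.inl (List.mem_reverse.mpr (hm g hg)))
  intro x
  constructor
  · exact q2 x
  · intro hx
    induction hx with
    | base hb => exact q1 _ hb
    | step _ hd ih => exact q3 _ ih _ hd

theorem pvMergedA_mem : ∀ (L : List String) (acc : List String) (s : PySem.Set String),
    (∀ x, x ∈ s ↔ x ∈ acc) →
    ∀ x, x ∈ (L.foldl (fun (st : List String × PySem.Set String) g =>
        if pvORDER.contains g && !(PySem.Set.contains st.2 g) then
          (st.1 ++ [g], PySem.Set.add st.2 g)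
        else st) (acc, s)).1
      ↔ x ∈ acc ∨ (x ∈ L ∧ x ∈ pvORDER) := by
  intro L
  induction L with
  | nil => intro acc s _ x; simp
  | cons g L ih =>
    intro acc s hs x
    by_cases hcond : (pvORDER.contains g && !(PySem.Set.contains s g)) = true
    · have hgO : g ∈ pvORDER := by
        have := ((Bool.and_eq_true _ _).mp hcond).1
        exact List.mem_of_elem_eq_true this
      have hstep : (List.foldl (fun (st : List String × PySem.Set String) g =>
          if pvORDER.contains g && !(PySem.Set.contains st.2 g) then
            (st.1 ++ [g], PySem.Set.add st.2 g)
          else st) (acc, s) (g :: L)).1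
          = (List.foldl (fun (st : List String × PySem.Set String) g =>
            if pvORDER.contains g && !(PySem.Set.contains st.2 g) then
              (st.1 ++ [g], PySem.Set.add st.2 g)
            else st) (acc ++ [g], PySem.Set.add s g) L).1 := by
        simp only [List.foldl_cons]; rw [if_pos hcond]
      rw [hstep]
      have hs' : ∀ y, y ∈ PySem.Set.add s g ↔ y ∈ acc ++ [g] := by
        intro y
        rw [PySem.Set.mem_add, List.mem_append, List.mem_singleton, hs y]
      rw [ih (acc ++ [g]) (PySem.Set.add s g) hs' x]
      simp only [List.mem_append, List.mem_cons]
      constructor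
      · rintro ((h | (rfl | h0)) | ⟨h1, h2⟩)
        · exact Or.inl h
        · exact Or.inr ⟨Or.inl rfl, hgO⟩
        · exact absurd h0 (List.not_mem_nil)
        · exact Or.inr ⟨Or.inr h1, h2⟩
      · rintro (h | ⟨(rfl | h1), h2⟩)
        · exact Or.inl (Or.inl h)
        · exact Or.inl (Or.inr (Or.inl rfl))
        · exact Or.inr ⟨h1, h2⟩
    · have hstep : (List.foldl (fun (st : List String × PySem.Set String) g =>
          if pvORDER.contains g && !(PySem.Set.contains st.2 g) then
            (st.1 ++ [g], PySem.Set.add st.2 g)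
          else st) (acc, s) (g :: L)).1
          = (List.foldl (fun (st : List String × PySem.Set String) g =>
            if pvORDER.contains g && !(PySem.Set.contains st.2 g) then
              (st.1 ++ [g], PySem.Set.add st.2 g)
            else st) (acc, s) L).1 := by
        simp only [List.foldl_cons]; rw [if_neg hcond]
      rw [hstep, ih acc s hs x]
      simp only [List.mem_cons]
      constructor
      · rintro (h | ⟨h1, h2⟩)
        · exact Or.inl h
        · exact Or.inr ⟨Or.inr h1, h2⟩
      · rintro (h | ⟨(rfl | h1), h2⟩)
        · exact Or.inl h
        · have hOc : pvORDER.contains x = true := List.elem_eq_true_of_mem h2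
          cases hb : PySem.Set.contains s x with
          | true => exact Or.inl ((hs x).mp ((PySem.Set.contains_iff s x).mp hb))
          | false => exact absurd (by rw [hOc, hb]; rfl) hcond
        · exact Or.inr ⟨h1, h2⟩

theorem pvFilter_contains_of_sublist : ∀ (l s : List String), s.Sublist l → l.Nodup →
    l.filter (fun g => s.contains g) = s := by
  intro l
  induction l with
  | nil =>
    intro s hsub _
    rw [List.sublist_nil.mp hsub]; rfl
  | cons a t ih =>
    intro s hsub hnd
    have hat : a ∉ t := (List.nodup_cons.mp hnd).1
    have hndt : t.Nodup := (List.nodup_cons.mp hnd).2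
    cases hsub with
    | cons _ hsub' =>
      -- s <+ t, so a ∉ s
      have has : a ∉ s := fun h => hat (hsub'.mem h)
      rw [List.filter_cons]
      rw [if_neg (by simpa using fun h => has (List.mem_of_elem_eq_true h))]
      exact ih s hsub' hndt
    | @cons₂ s' _ _ hsub' =>
      rw [List.filter_cons]
      rw [if_pos (by simp)]
      have : t.filter (fun g => (a :: s').contains g) = t.filter (fun g => s'.contains g) := by
        apply List.filter_congr
        intro x hx
        have hxa : x ≠ a := fun h => hat (h ▸ hx)
        simp [hxa]
      rw [this, ih s' hsub' hndt]

theorem pvLoop_main (fd : List (String × List (List (String × String))))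
    (si : List (String × List Int)) (dOnly : List String) (merged : PySem.Set String) :
    ∀ (gs : List String) (acc : PySem.Dict String (List (List (String × String))))
      (sec : List String), gs.Nodup → (∀ g ∈ gs, acc.contains g = false) →
    (∀ g ∈ gs, pvSubsetA fd si dOnly g = pvSubsetB fd si merged g) →
    gs.foldl (pvStepB' fd si merged) (acc, sec)
      = (gs.foldl (pvStepA fd si dOnly) acc,
         sec ++ gs.filter (fun g => !(pvSubsetA fd si dOnly g).isEmpty)) ∧
    (gs.foldl (pvStepA fd si dOnly) acc).keys
      = acc.keys ++ gs.filter (fun g => !(pvSubsetA fd si dOnly g).isEmpty) := by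
  intro gs
  induction gs with
  | nil => intro acc sec _ _ _; simp
  | cons g t ih =>
    intro acc sec hnd hfresh hsub
    have hgt : g ∉ t := (List.nodup_cons.mp hnd).1
    have hndt : t.Nodup := (List.nodup_cons.mp hnd).2
    have hsg : pvSubsetA fd si dOnly g = pvSubsetB fd si merged g :=
      hsub g (List.mem_cons_self ..)
    by_cases hemp : (pvSubsetA fd si dOnly g).isEmpty
    · have hA : pvStepA fd si dOnly acc g = acc := by
        unfold pvStepA; rw [if_pos hemp]
      have hB : pvStepB' fd si merged (acc, sec) g = (acc, sec) := by
        unfold pvStepB'; rw [if_pos (hsg ▸ hemp)]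
      have hfl : List.filter (fun g => !(pvSubsetA fd si dOnly g).isEmpty) (g :: t)
          = List.filter (fun g => !(pvSubsetA fd si dOnly g).isEmpty) t := by
        rw [List.filter_cons, if_neg (by simp [hemp])]
      rw [List.foldl_cons, List.foldl_cons, hA, hB, hfl]
      exact ih acc sec hndt (fun g' hg' => hfresh g' (List.mem_cons_of_mem _ hg'))
        (fun g' hg' => hsub g' (List.mem_cons_of_mem _ hg'))
    · have hfg : acc.contains g = false := hfresh g (List.mem_cons_self ..)
      have hA : pvStepA fd si dOnly acc g = acc.insert g (pvSubsetA fd si dOnly g) := by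
        unfold pvStepA; rw [if_neg hemp]
      have hB : pvStepB' fd si merged (acc, sec) g
          = (acc.insert g (pvSubsetA fd si dOnly g), sec ++ [g]) := by
        unfold pvStepB'; rw [← hsg, if_neg hemp]
      have hfl : List.filter (fun g => !(pvSubsetA fd si dOnly g).isEmpty) (g :: t)
          = g :: List.filter (fun g => !(pvSubsetA fd si dOnly g).isEmpty) t := by
        rw [List.filter_cons, if_pos (by simp [hemp])]
      have hfresh' : ∀ g' ∈ t, (acc.insert g (pvSubsetA fd si dOnly g)).contains g' = false := by
        intro g' hg'
        rw [PySem.Dict.contains_insert]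
        have : (g' == g) = false := by
          simp only [beq_eq_false_iff_ne, ne_eq]
          exact fun h => hgt (h ▸ hg')
        rw [this, hfresh g' (List.mem_cons_of_mem _ hg')]
        rfl
      obtain ⟨ih1, ih2⟩ := ih (acc.insert g (pvSubsetA fd si dOnly g)) (sec ++ [g]) hndt hfresh'
        (fun g' hg' => hsub g' (List.mem_cons_of_mem _ hg'))
      constructor
      · rw [List.foldl_cons, List.foldl_cons, hA, hB, ih1, hfl]
        simp [List.append_assoc]
      · rw [List.foldl_cons, hA, ih2, hfl]
        rw [PySem.Dict.keys_insert_of_not_contains _ _ hfg]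
        simp [List.append_assoc]

-- ===== VERDICT (by name: the statement is the Claim_ definition above) =====
set_option maxHeartbeats 1000000 in
theorem filter_site_data_py_spec : Claim_equal_filter_site_data_py := by
  intro full_data explicit_groups selected_items _
  unfold Spec_filter_site_data_py filter_site_data_py filter_site_data_py_alt
    pvExpandDependencies
  dsimp only
  set egg := if explicit_groups.isEmpty && selected_items.isEmpty then pvORDER
    else explicit_groups with hegg
  set L1 := egg ++ pvORDER.filter (fun g => (PySem.Dict.mk selected_items).contains g) with hL1
  set mA := (L1.foldl (fun (st : List String × PySem.Set String) g =>
      if pvORDER.contains g && !(PySem.Set.contains st.2 g) then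
        (st.1 ++ [g], PySem.Set.add st.2 g)
      else st) ([], PySem.Set.empty)).1 with hmA
  set mB := PySem.Set.ofList
      ((egg ++ (PySem.Dict.mk selected_items).keys).filter (fun g => pvDEPS.contains g)) with hmB
  set EA := pvExpandLoop 14 (PySem.Set.ofList mA) PySem.Set.empty with hEA
  set needed := pvORDER.reverse.foldl pvRelax mB with hneeded
  -- membership characterisations of the two merged collections
  have hmemA : ∀ x, x ∈ mA ↔
      (x ∈ egg ∨ (PySem.Dict.mk selected_items).contains x = true) ∧ x ∈ pvORDER := by
    intro x
    rw [hmA, pvMergedA_mem L1 [] PySem.Set.empty (fun y => by simp [PySem.Set.empty]) x]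
    rw [hL1]
    simp only [List.not_mem_nil, false_or, List.mem_append, List.mem_filter]
    constructor
    · rintro ⟨(h | ⟨hO, hc⟩), hO'⟩
      · exact ⟨Or.inl h, hO'⟩
      · exact ⟨Or.inr hc, hO⟩
    · rintro ⟨(h | hc), hO⟩
      · exact ⟨Or.inl h, hO⟩
      · exact ⟨Or.inr ⟨hO, hc⟩, hO⟩
  have hmemB : ∀ x, x ∈ mB ↔
      (x ∈ egg ∨ (PySem.Dict.mk selected_items).contains x = true) ∧ x ∈ pvORDER := by
    intro x
    rw [hmB, PySem.Set.mem_ofList, List.mem_filter, List.mem_append, pvDEPS_contains_iff]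
    rw [← PySem.Dict.contains_iff_mem_keys]
  have hmemAB : ∀ x, x ∈ mA ↔ x ∈ mB := fun x => (hmemA x).trans (hmemB x).symm
  have hmB_sub : ∀ g ∈ mB, g ∈ pvORDER := fun g hg => ((hmemB g).mp hg).2
  -- the two dependency closures agree
  obtain ⟨hc1, hc2⟩ := pvA_closure mA
  have hclosB := pvB_closure mB hmB_sub
  rw [← hEA] at hc1 hc2
  rw [← hneeded] at hclosB
  have hneed : ∀ x, x ∈ needed ↔ x ∈ EA.1 := by
    intro x
    rw [hclosB x, hc1 x]
    exact pvInCl_congr (fun g => (hmemAB g).symm)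
  -- the dependency-only lists agree
  have hpred_dep : ∀ g ∈ pvORDER,
      (EA.2.contains g && !(mA.contains g)) = (needed.contains g && !(mB.contains g)) := by
    intro g _
    rw [Bool.eq_iff_iff]
    simp only [Bool.and_eq_true, Bool.not_eq_true', Bool.eq_false_iff, ne_eq,
      PySem.Set.contains_iff, List.contains_iff_mem]
    rw [hc2 g, hneed g, hmemAB g]
    constructor
    · rintro ⟨⟨h1, _⟩, h3⟩; exact ⟨h1, h3⟩
    · rintro ⟨h1, h2⟩; exact ⟨⟨h1, h2⟩, h2⟩
  have hdep : List.filter (fun g => EA.2.contains g && !(mA.contains g)) pvORDER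
      = List.filter (fun g => needed.contains g && !(mB.contains g)) pvORDER :=
    List.filter_congr hpred_dep
  -- the expanded group lists agree
  have hexp : List.filter (fun g => EA.1.contains g) pvORDER
      = List.filter (fun g => needed.contains g) pvORDER := by
    refine List.filter_congr (fun g _ => ?_)
    rw [Bool.eq_iff_iff, PySem.Set.contains_iff, PySem.Set.contains_iff]
    exact (hneed g).symm
  set dOnlyA := List.filter (fun g => EA.2.contains g && !(mA.contains g)) pvORDER with hdOnlyA
  set gsB := List.filter (fun g => needed.contains g) pvORDER with hgsB
  -- per-group subsets agree on the groups the loops visit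
  have hsubeq : ∀ g ∈ gsB,
      pvSubsetA full_data selected_items dOnlyA g = pvSubsetB full_data selected_items mB g := by
    intro g hg
    obtain ⟨hgO, hgneed⟩ := List.mem_filter.mp hg
    have hgE : g ∈ EA.1 := (hneed g).mp ((PySem.Set.contains_iff needed g).mp hgneed)
    have h1 : g ∈ dOnlyA ↔ g ∉ mA := by
      rw [hdOnlyA, List.mem_filter]
      simp only [Bool.and_eq_true, Bool.not_eq_true', Bool.eq_false_iff, ne_eq,
        PySem.Set.contains_iff, List.contains_iff_mem]
      rw [hc2 g]
      constructor
      · rintro ⟨_, ⟨_, h⟩, _⟩; exact h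
      · intro h; exact ⟨hgO, ⟨hgE, h⟩, h⟩
    have hcond : (!(dOnlyA.contains g)) = PySem.Set.contains mB g := by
      rw [Bool.eq_iff_iff, Bool.not_eq_true', Bool.eq_false_iff, ne_eq, List.contains_iff_mem,
        PySem.Set.contains_iff, h1, ← hmemAB g]
      exact not_not
    unfold pvSubsetA pvSubsetB
    rw [← hcond, Bool.and_comm]
  -- B's guarded loop over pvORDER is the unguarded loop over the needed groups
  have hstage1 : List.foldl (pvStepB full_data selected_items mB needed)
        (PySem.Dict.empty, ([] : List String)) pvORDER
      = List.foldl (pvStepB' full_data selected_items mB)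
        (PySem.Dict.empty, ([] : List String)) gsB := by
    rw [PySem.List.foldl_congr_mem pvORDER (pvStepB full_data selected_items mB needed)
      (fun st g => if PySem.Set.contains needed g then pvStepB' full_data selected_items mB st g
        else st) (PySem.Dict.empty, ([] : List String))
      (fun st g _ => by unfold pvStepB; cases h : PySem.Set.contains needed g <;> simp only [h] <;> rfl)]
    rw [PySem.List.foldl_if_eq_foldl_filter (fun g => PySem.Set.contains needed g)
      (pvStepB' full_data selected_items mB) pvORDER (PySem.Dict.empty, ([] : List String))]
  have hgsB_nodup : gsB.Nodup := List.Nodup.filter _ (by decide : pvORDER.Nodup)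
  obtain ⟨hfold, hkeys⟩ := pvLoop_main full_data selected_items dOnlyA mB gsB
    PySem.Dict.empty [] hgsB_nodup (fun g _ => PySem.Dict.contains_empty g) hsubeq
  set emits := gsB.filter (fun g => !(pvSubsetA full_data selected_items dOnlyA g).isEmpty)
    with hemits
  have hkeys' : (gsB.foldl (pvStepA full_data selected_items dOnlyA) PySem.Dict.empty).keys
      = emits := by
    rw [hkeys, PySem.Dict.keys_empty, List.nil_append]
  have hemits_sl : emits.Sublist pvORDER :=
    (List.filter_sublist).trans (List.filter_sublist)
  -- the sections list A recomputes is exactly the keys B collected on the fly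
  have hsections : List.filter
        (fun g => (gsB.foldl (pvStepA full_data selected_items dOnlyA) PySem.Dict.empty).contains g)
        pvORDER = emits := by
    have hcong : ∀ g ∈ pvORDER,
        ((gsB.foldl (pvStepA full_data selected_items dOnlyA) PySem.Dict.empty).contains g)
          = emits.contains g := by
      intro g _
      rw [PySem.Dict.contains_eq_decide_mem_keys, hkeys', Bool.eq_iff_iff, decide_eq_true_iff,
        List.contains_iff_mem]
    rw [List.filter_congr hcong]
    exact pvFilter_contains_of_sublist pvORDER emits hemits_sl (by decide)
  rw [hexp, hstage1, hfold]
  dsimp only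
  simp only [Prod.mk.injEq, List.nil_append]
  exact ⟨trivial, hsections, hdep⟩
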